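-- pv_equiv track=rewrite | github.com/LinkDry/Validated-Intent-Compilation-for-Constrained-Routing-in-LEO-Mega-Constellations | intent/verifier.py | _certify_f1
-- ===== SOURCE A (Python) =====
-- from collections import deque
--
-- def _certify_f1(adj, src, dst):
--     """F1: BFS reachability. Returns path list or None."""
--     if src not in adj or dst not in adj:
--         return None
--     prev = {src: None}
--     q = deque([src])
--     while q:
--         u = q.popleft()
--         if u == dst:
--             path = []
--             n = dst
--             while n is not None:
--                 path.append(n)
--                 n = prev[n]
--             return list(reversed(path))
--         for v, _ in adj.get(u, []):
--             if v not in prev: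
--                 prev[v] = u
--                 q.append(v)
--     return None
-- ===== SOURCE B (Python) =====
-- def _certify_f1(adj, src, dst):
--     """F1: BFS reachability. Returns path list or None.
--     Cursor-scan BFS over a growing list of full forward paths: no deque, no
--     parent-pointer dict and no backward reconstruction; each node is expanded
--     by a staged filter-unseen / dedup / batch-extend pass over its neighbours."""
--     if not (src in adj and dst in adj):
--         return None
--     paths = [[src]]
--     seen = {src}
--     i = 0
--     while i < len(paths):
--         p = paths[i]
--         i += 1
--         last = p[-1]
--         if last == dst:
--             return p
--         fresh = list(dict.fromkeys(v for v, _ in adj.get(last, []) if v not in seen))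
--         seen.update(fresh)
--         paths.extend(p + [v] for v in fresh)
--     return None
-- ===== Notes on version B (the rewrite author's own statement) =====
-- stated objective: alternative
-- what changed: Replaces the deque + parent-pointer dict + backward path reconstruction/reverse with a cursor-scan BFS over a growing list of full forward paths, expanding each node by a staged filter-unseen / dedup / batch-extend pass over its neighbours and returning the scanned path directly at the target.
import Mathlib
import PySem

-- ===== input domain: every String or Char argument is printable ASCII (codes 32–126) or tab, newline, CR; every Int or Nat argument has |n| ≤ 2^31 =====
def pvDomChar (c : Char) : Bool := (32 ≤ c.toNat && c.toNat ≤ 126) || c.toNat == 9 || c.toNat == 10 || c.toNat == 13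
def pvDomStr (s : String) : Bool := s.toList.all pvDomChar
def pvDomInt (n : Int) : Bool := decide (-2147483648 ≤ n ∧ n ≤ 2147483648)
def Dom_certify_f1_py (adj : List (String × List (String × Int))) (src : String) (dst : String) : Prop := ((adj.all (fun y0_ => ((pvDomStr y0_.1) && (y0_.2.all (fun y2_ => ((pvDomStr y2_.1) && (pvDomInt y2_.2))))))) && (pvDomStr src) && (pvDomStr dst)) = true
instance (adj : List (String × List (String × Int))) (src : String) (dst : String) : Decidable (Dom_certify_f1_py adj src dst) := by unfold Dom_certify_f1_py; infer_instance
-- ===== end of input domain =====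

-- B drops A's parent-pointer dict and backward reconstruction: it carries full forward
-- paths in the queue and expands each node in staged passes (filter unseen neighbours,
-- dedup, batch-extend) — an alternative decomposition of the same BFS.

-- shared totalization bound for the while-loops: BFS pops at most 1 + (number of edge
-- entries) nodes (each node is enqueued at most once, at a fresh discovery), +1 to observe
-- the empty queue.
def pvFuel (adj : List (String × List (String × Int))) : Nat :=
  2 + (adj.map (fun p => p.2.length)).sum

-- ===== PORT A =====
-- A's inner reconstruction loop 'while n is not None: path.append(n); n = prev[n]'.
-- Fueled by the dict size (the parent chain visits distinct keys of prev, so prev.size + 1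
-- steps always finish it); prev[n] is ported as getD with default none: on every state A
-- reaches, n is a key of prev, so Python's raw prev[n] never raises.
def pvBuildA (prev : PySem.Dict String (Option String)) : Nat → Option String → List String → List String
  | _, none, path => path
  | 0, some _, path => path
  | f+1, some n, path => pvBuildA prev f (PySem.Dict.getD prev n none) (path ++ [n])

-- A's main 'while q' loop over (prev, q)
def pvLoopA (adj : PySem.Dict String (List (String × Int))) (dst : String) :
    Nat → PySem.Dict String (Option String) → List String → Option (List String)
  | 0, _, _ => none
  | _+1, _, [] => none
  | f+1, prev, u :: q =>
    if u = dst then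
      some (pvBuildA prev (prev.size + 1) (some dst) []).reverse
    else
      let st := (PySem.Dict.getD adj u []).foldl
        (fun (st : PySem.Dict String (Option String) × List String) vw =>
          if st.1.contains vw.1 then st
          else (st.1.insert vw.1 (some u), st.2 ++ [vw.1])) (prev, q)
      pvLoopA adj dst f st.1 st.2

def certify_f1_py (adj : List (String × List (String × Int))) (src : String) (dst : String) : Option (List String) :=
  let d : PySem.Dict String (List (String × Int)) := PySem.Dict.mk adj
  if !(d.contains src) || !(d.contains dst) then none
  else pvLoopA d dst (pvFuel adj) (PySem.Dict.insert PySem.Dict.empty src none) [src]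

-- ===== PORT B =====
-- B's 'while i < len(paths)' cursor scan over the growing list of forward paths;
-- 'i < len(paths)' + 'paths[i]' is the paths[i]? lookup (some ↔ the loop continues);
-- p[-1] is getLastD "" (stored paths are never empty, so Python's p[-1] never raises);
-- 'dict.fromkeys(… if v not in seen)' is dedup ∘ filter, 'seen.update' is Set.update.
def pvLoopB (adj : PySem.Dict String (List (String × Int))) (dst : String) :
    Nat → List (List String) → Nat → PySem.Set String → Option (List String)
  | 0, _, _, _ => none
  | k+1, paths, i, seen =>
    match paths[i]? with
    | none => none
    | some p =>
      let last := p.getLastD ""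
      if last = dst then some p
      else
        let fresh := PySem.List.dedup
          (((PySem.Dict.getD adj last []).map Prod.fst).filter
            (fun v => !(PySem.Set.contains seen v)))
        pvLoopB adj dst k (paths ++ fresh.map (fun v => p ++ [v])) (i + 1)
          (PySem.Set.update seen fresh)

def certify_f1_py_alt (adj : List (String × List (String × Int))) (src : String) (dst : String) : Option (List String) :=
  let m : PySem.Dict String (List (String × Int)) := PySem.Dict.mk adj
  if m.contains src && m.contains dst then
    pvLoopB m dst (pvFuel adj) [[src]] 0 (PySem.Set.add PySem.Set.empty src)
  else none

-- ===== PRECONDITION & SPEC =====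
def Spec_certify_f1_py (adj : List (String × List (String × Int))) (src : String) (dst : String) (out : Option (List String)) : Prop := out = certify_f1_py_alt adj src dst
instance (adj : List (String × List (String × Int))) (src : String) (dst : String) (out : Option (List String)) : Decidable (Spec_certify_f1_py adj src dst out) := by unfold Spec_certify_f1_py; infer_instance

-- ===== CLAIM (what is proved, stated in full; the proofs are below) =====
def Claim_equal_certify_f1_py : Prop := ∀ (adj : List (String × List (String × Int))) (src : String) (dst : String), Dom_certify_f1_py adj src dst → Spec_certify_f1_py adj src dst (certify_f1_py adj src dst)

-- ===== LEMMAS AND PROOFS =====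

lemma set_contains_add (s : PySem.Set String) (x y : String) :
    PySem.Set.contains (PySem.Set.add s x) y = (PySem.Set.contains s y || y == x) := by
  by_cases h : x ∈ s
  · rw [PySem.Set.add_of_mem h]
    cases hb : (y == x)
    · simp
    · have hy : y ∈ s := by rw [eq_of_beq hb]; exact h
      have hc := (PySem.Set.contains_iff s y).2 hy
      rw [hc]; simp
  · rw [PySem.Set.add_of_not_mem h]
    show List.contains (s ++ [x]) y = _
    simp only [PySem.Set.contains, List.contains_append]
    cases hb : (y == x)
    · have : y ≠ x := fun he => by rw [he] at hb; simp at hb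
      simp [this]
    · simp [eq_of_beq hb]

lemma getLastD_rev (l : List String) (d : String) : l.getLastD d = l.reverse.headD d := by
  simp [List.getLastD_eq_getLast?, List.head?_reverse]

lemma pvDedup_cons (x : String) (l : List String) :
    PySem.List.dedup (x :: l) = x :: (PySem.List.dedup l).filter (fun v => !(v == x)) := by
  simp [PySem.Set.ofList_cons, PySem.Set.discard]

lemma filter_swap (p q : String → Bool) (s : List String) :
    (s.filter q).filter p = (s.filter p).filter q := by
  rw [List.filter_filter, List.filter_filter]
  apply List.filter_congr
  intro x _
  cases p x <;> cases q x <;> rfl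

lemma dedup_filter (p : String → Bool) : ∀ l : List String,
    (PySem.List.dedup l).filter p = PySem.List.dedup (l.filter p) := by
  intro l
  induction l with
  | nil => simp
  | cons a l ih =>
    cases hp : p a
    · have h1 : List.filter p (a :: l) = List.filter p l := by rw [List.filter_cons, hp]; simp
      rw [h1, ← ih, pvDedup_cons, List.filter_cons, hp]
      simp only [Bool.false_eq_true, if_false]
      rw [List.filter_filter]
      apply List.filter_congr
      intro x _
      cases hx : x == a
      · simp
      · rw [eq_of_beq hx, hp]; simp
    · have h1 : List.filter p (a :: l) = a :: List.filter p l := by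
        rw [List.filter_cons, hp]; simp
      rw [h1, pvDedup_cons, pvDedup_cons, ← ih, List.filter_cons, hp]
      simp only [if_true]
      rw [filter_swap]

lemma filter_add_visited (visited : PySem.Set String) (e : String) (l : List String) :
    l.filter (fun v => !(PySem.Set.contains (PySem.Set.add visited e) v))
    = (l.filter (fun v => !(PySem.Set.contains visited v))).filter (fun v => !(v == e)) := by
  rw [List.filter_filter]
  apply List.filter_congr
  intro v _
  rw [set_contains_add, Bool.not_or]
  cases PySem.Set.contains visited v <;> cases v == e <;> rfl

-- 'rp is the parent chain of its head in prev': every element is a key of prev, consecutive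
-- elements are linked by prev, and the chain ends at a key whose stored parent is none.
def pvChain (prev : PySem.Dict String (Option String)) : List String → Prop
  | [] => False
  | [u] => prev.contains u = true ∧ PySem.Dict.getD prev u none = none
  | u :: p :: rest => prev.contains u = true ∧ PySem.Dict.getD prev u none = some p ∧ pvChain prev (p :: rest)

lemma pvChain_mem_contains {prev : PySem.Dict String (Option String)} {rp : List String}
    (h : pvChain prev rp) : ∀ x ∈ rp, prev.contains x = true := by
  induction rp with
  | nil => exact h.elim
  | cons u rest ih =>
    cases rest with
    | nil => intro x hx; simp at hx; subst hx; exact h.1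
    | cons p r =>
      intro x hx
      rcases List.mem_cons.1 hx with rfl | hx
      · exact h.1
      · exact ih h.2.2 x hx

lemma pvChain_insert_fresh {prev : PySem.Dict String (Option String)} {rp : List String}
    {k : String} {v : Option String} (hk : prev.contains k = false)
    (h : pvChain prev rp) : pvChain (prev.insert k v) rp := by
  induction rp with
  | nil => exact h.elim
  | cons u rest ih =>
    have hu : u ≠ k := by
      intro he; rw [← he] at hk
      have := pvChain_mem_contains h u (List.mem_cons_self ..)
      simp [this] at hk
    cases rest with
    | nil =>
      exact ⟨by simp [PySem.Dict.contains_insert, h.1],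
             by rw [PySem.Dict.getD_insert_of_ne prev v none hu]; exact h.2⟩
    | cons p r =>
      exact ⟨by simp [PySem.Dict.contains_insert, h.1],
             by rw [PySem.Dict.getD_insert_of_ne prev v none hu]; exact h.2.1,
             ih h.2.2⟩

-- the reconstruction loop run on the head of a chain produces exactly that chain (appended)
lemma pvBuildA_of_chain {prev : PySem.Dict String (Option String)} :
    ∀ (rp : List String) (f : Nat) (acc : List String), pvChain prev rp → rp.length ≤ f →
      pvBuildA prev f (some (rp.headD "")) acc = acc ++ rp := by
  intro rp
  induction rp with
  | nil => intro f acc h; exact h.elim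
  | cons u rest ih =>
    intro f acc h hlen
    cases f with
    | zero => simp at hlen
    | succ f =>
      cases rest with
      | nil =>
        simp only [List.headD, pvBuildA]
        rw [h.2]
        simp [pvBuildA]
      | cons p r =>
        simp only [List.headD, pvBuildA]
        rw [h.2.1]
        have := ih f (acc ++ [u]) h.2.2 (by simpa using Nat.le_of_succ_le_succ hlen)
        simp only [List.headD] at this
        rw [this]; simp

-- a Nodup list of keys of prev is no longer than prev itself
lemma pvChain_length_le {prev : PySem.Dict String (Option String)} {rp : List String}
    (h : pvChain prev rp) (hnd : rp.Nodup) : rp.length ≤ prev.size := by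
  have hsub : rp ⊆ prev.keys := by
    intro x hx
    exact (PySem.Dict.contains_iff_mem_keys prev x).1 (pvChain_mem_contains h x hx)
  have hkeys : prev.keys.length = prev.size := by
    simp [PySem.Dict.keys, PySem.Dict.size]
  calc rp.length = rp.toFinset.card := (List.toFinset_card_of_nodup hnd).symm
    _ ≤ prev.keys.toFinset.card := Finset.card_le_card (by
        intro x hx; simp only [List.mem_toFinset] at hx ⊢; exact hsub hx)
    _ ≤ prev.keys.length := prev.keys.toFinset_card_le
    _ = prev.size := hkeys

lemma pvChain_cons {prev : PySem.Dict String (Option String)} {v u : String} {rp : List String}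
    (h1 : prev.contains v = true) (h2 : PySem.Dict.getD prev v none = some u)
    (hh : rp.headD "" = u) (hch : pvChain prev rp) : pvChain prev (v :: rp) := by
  cases rp with
  | nil => exact hch.elim
  | cons a rest =>
    have ha : a = u := by simpa using hh
    subst ha
    exact ⟨h1, h2, hch⟩

-- facts about folding insertions of a fresh batch into the parent dict
lemma contains_foldl_insert (u : String) : ∀ (L : List String) (d : PySem.Dict String (Option String)) (x : String),
    (L.foldl (fun d v => d.insert v (some u)) d).contains x = (d.contains x || L.contains x) := by
  intro L
  induction L with
  | nil => intro d x; simp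
  | cons a L ih =>
    intro d x
    rw [List.foldl_cons, ih, PySem.Dict.contains_insert, List.contains_cons]
    cases d.contains x <;> cases (x == a) <;> cases L.contains x <;> rfl

lemma getD_foldl_insert_notmem (u : String) : ∀ (L : List String) (d : PySem.Dict String (Option String)) (x : String),
    x ∉ L → (L.foldl (fun d v => d.insert v (some u)) d).getD x none = d.getD x none := by
  intro L
  induction L with
  | nil => intro d x _; rfl
  | cons a L ih =>
    intro d x hx
    rw [List.foldl_cons, ih (d.insert a (some u)) x (fun h => hx (List.mem_cons_of_mem _ h)),
        PySem.Dict.getD_insert_of_ne d (some u) none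
          (fun h => hx (by rw [h]; exact List.mem_cons_self ..))]

lemma getD_foldl_insert_mem (u : String) : ∀ (L : List String) (d : PySem.Dict String (Option String)) (x : String),
    L.Nodup → x ∈ L → (L.foldl (fun d v => d.insert v (some u)) d).getD x none = some u := by
  intro L
  induction L with
  | nil => intro d x _ hx; exact absurd hx (List.not_mem_nil)
  | cons a L ih =>
    intro d x hnd hx
    rw [List.foldl_cons]
    rcases List.mem_cons.1 hx with rfl | hx
    · rw [getD_foldl_insert_notmem u L _ x (List.nodup_cons.1 hnd).1,
          PySem.Dict.getD_insert_self]
    · exact ih _ x (List.nodup_cons.1 hnd).2 hx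

lemma nodup_keys_foldl_insert (u : String) : ∀ (L : List String) (d : PySem.Dict String (Option String)),
    d.keys.Nodup → (L.foldl (fun d v => d.insert v (some u)) d).keys.Nodup := by
  intro L
  induction L with
  | nil => intro d h; exact h
  | cons a L ih =>
    intro d h
    exact ih _ (PySem.Dict.nodup_keys_insert d a (some u) h)

lemma chain_foldl_insert (u : String) : ∀ (L : List String) (d : PySem.Dict String (Option String)) (rp : List String),
    (∀ v ∈ L, d.contains v = false) → L.Nodup → pvChain d rp →
    pvChain (L.foldl (fun d v => d.insert v (some u)) d) rp := by
  intro L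
  induction L with
  | nil => intro d rp _ _ h; exact h
  | cons a L ih =>
    intro d rp hfr hnd hch
    rw [List.foldl_cons]
    apply ih
    · intro v hv
      rw [PySem.Dict.contains_insert]
      have hva : v ≠ a := fun he => (List.nodup_cons.1 hnd).1 (he ▸ hv)
      have : (v == a) = false := by simp [hva]
      rw [this, hfr v (List.mem_cons_of_mem _ hv)]
      rfl
    · exact (List.nodup_cons.1 hnd).2
    · exact pvChain_insert_fresh (hfr a (List.mem_cons_self ..)) hch

-- visited/parent-dict correspondence survives adding the same fresh batch to both
lemma Hcv_update (u : String) : ∀ (L : List String) (s : PySem.Set String) (d : PySem.Dict String (Option String)),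
    (∀ x, PySem.Set.contains s x = d.contains x) →
    ∀ x, PySem.Set.contains (PySem.Set.update s L) x
         = (L.foldl (fun d v => d.insert v (some u)) d).contains x := by
  intro L
  induction L with
  | nil => intro s d h x; exact h x
  | cons a L ih =>
    intro s d h x
    rw [PySem.Set.update_cons, List.foldl_cons]
    apply ih
    intro y
    rw [set_contains_add, PySem.Dict.contains_insert, h y]
    cases d.contains y <;> cases (y == a) <;> rfl

-- A's neighbour fold, characterized as B computes it: the appended nodes are exactly the
-- deduped unseen neighbours, and the dict gains them (parent u) in that order
lemma pvFoldA_char (u : String) : ∀ (E : List (String × Int)) (prev : PySem.Dict String (Option String))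
    (visited : PySem.Set String) (qA : List String),
    (∀ x, PySem.Set.contains visited x = prev.contains x) →
    E.foldl (fun (st : PySem.Dict String (Option String) × List String) vw =>
        if st.1.contains vw.1 then st
        else (st.1.insert vw.1 (some u), st.2 ++ [vw.1])) (prev, qA)
    = ((PySem.List.dedup ((E.map Prod.fst).filter (fun v => !(PySem.Set.contains visited v)))).foldl
          (fun d v => d.insert v (some u)) prev,
       qA ++ PySem.List.dedup ((E.map Prod.fst).filter (fun v => !(PySem.Set.contains visited v)))) := by
  intro E
  induction E with
  | nil => intro prev visited qA _; simp
  | cons e E ih =>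
    intro prev visited qA hcv
    rw [List.foldl_cons, List.map_cons, List.filter_cons]
    cases hv : PySem.Set.contains visited e.1
    · have hp : prev.contains e.1 = false := by rw [← hcv]; exact hv
      rw [if_neg (by simp [hp]), if_pos (by simp)]
      rw [ih (prev.insert e.1 (some u)) (PySem.Set.add visited e.1) (qA ++ [e.1])
            (by intro y
                rw [set_contains_add, PySem.Dict.contains_insert, hcv y]
                cases prev.contains y <;> cases (y == e.1) <;> rfl)]
      rw [filter_add_visited, ← dedup_filter, pvDedup_cons, List.foldl_cons]
      simp
    · have hp : prev.contains e.1 = true := by rw [← hcv]; exact hv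
      rw [if_pos (by simp [hp]), if_neg (by simp)]
      exact ih prev visited qA hcv

lemma forall₂_map_self {R : String → List String → Prop} (g : String → List String) :
    ∀ L : List String, (∀ v ∈ L, R v (g v)) → List.Forall₂ R L (L.map g) := by
  intro L
  induction L with
  | nil => intro _; exact List.Forall₂.nil
  | cons a L ih =>
    intro h
    exact List.Forall₂.cons (h a (List.mem_cons_self ..))
      (ih fun v hv => h v (List.mem_cons_of_mem _ hv))

-- the global loop invariant: A's queue matches the unscanned tail of B's path list
def pvInv (prev : PySem.Dict String (Option String)) (seen : PySem.Set String)
    (qA : List String) (paths : List (List String)) (i : Nat) : Prop :=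
  (∀ x, PySem.Set.contains seen x = prev.contains x) ∧ prev.keys.Nodup ∧
  List.Forall₂ (fun u p => pvChain prev p.reverse ∧ p.reverse.headD "" = u ∧ p.reverse.Nodup) qA (paths.drop i)

-- the two loops agree under the invariant, at equal fuel
lemma pvLoop_eq (adj : PySem.Dict String (List (String × Int))) (dst : String) :
    ∀ (f : Nat) (prev : PySem.Dict String (Option String)) (seen : PySem.Set String)
      (qA : List String) (paths : List (List String)) (i : Nat), pvInv prev seen qA paths i →
      pvLoopA adj dst f prev qA = pvLoopB adj dst f paths i seen := by
  intro f
  induction f with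
  | zero => intro prev seen qA paths i _; rfl
  | succ f ih =>
    intro prev seen qA paths i hInv
    have hhd : paths[i]? = (paths.drop i).head? := List.head?_drop.symm
    have hF := hInv.2.2
    cases hq : paths.drop i with
    | nil =>
      rw [hq] at hF
      cases hF
      simp only [pvLoopA, pvLoopB, hhd, hq, List.head?_nil]
    | cons p rest =>
      rw [hq] at hF
      cases hF with
      | cons hpair hrest =>
      rename_i u qA'
      obtain ⟨hch, hh, hnd⟩ := hpair
      have hu : p.getLastD "" = u := by rw [getLastD_rev]; exact hh
      have hi : i < paths.length := by
        by_contra hle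
        have h0 : paths.drop i = [] := List.drop_eq_nil_of_le (Nat.le_of_not_lt hle)
        rw [h0] at hq
        simp at hq
      have hrest' : paths.drop (i + 1) = rest := by
        have ht : (paths.drop i).tail = paths.drop (i + 1) := List.tail_drop
        rw [hq] at ht
        simpa using ht.symm
      simp only [pvLoopA, pvLoopB, hhd, hq, List.head?_cons, hu]
      by_cases hdst : u = dst
      · rw [if_pos hdst, if_pos hdst]
        have hlen : p.reverse.length ≤ prev.size + 1 :=
          Nat.le_succ_of_le (pvChain_length_le hch hnd)
        have hb := pvBuildA_of_chain p.reverse (prev.size + 1) [] hch hlen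
        rw [hh, hdst] at hb
        rw [hb]
        simp
      · rw [if_neg hdst, if_neg hdst]
        rw [pvFoldA_char u (PySem.Dict.getD adj u []) prev seen qA' hInv.1]
        set fresh := PySem.List.dedup
          (((PySem.Dict.getD adj u []).map Prod.fst).filter
            (fun v => !(PySem.Set.contains seen v))) with hfresh
        have hfr : ∀ v ∈ fresh, prev.contains v = false := by
          intro v hv
          rw [hfresh] at hv
          have hv' := (PySem.List.mem_dedup _ _).1 hv
          have := List.of_mem_filter hv'
          rw [← hInv.1 v]
          simpa using this
        have hfnd : fresh.Nodup := by rw [hfresh]; exact PySem.List.nodup_dedup _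
        apply ih
        refine ⟨Hcv_update u fresh seen prev hInv.1, nodup_keys_foldl_insert u fresh prev hInv.2.1, ?_⟩
        rw [List.drop_append_of_le_length hi, hrest']
        apply List.rel_append
        · exact hrest.imp (fun {a} {b} hp =>
            ⟨chain_foldl_insert u fresh prev b.reverse hfr hfnd hp.1, hp.2⟩)
        · apply forall₂_map_self
          intro v hv
          have hvc : (fresh.foldl (fun d v => d.insert v (some u)) prev).contains v = true := by
            rw [contains_foldl_insert]
            simp only [Bool.or_eq_true]
            right
            simpa using hv
          have hvg : (fresh.foldl (fun d v => d.insert v (some u)) prev).getD v none = some u :=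
            getD_foldl_insert_mem u fresh prev v hfnd hv
          refine ⟨?_, ?_, ?_⟩
          · rw [List.reverse_append]
            simp only [List.reverse_cons, List.reverse_nil, List.nil_append, List.singleton_append]
            exact pvChain_cons hvc hvg hh (chain_foldl_insert u fresh prev p.reverse hfr hfnd hch)
          · simp
          · rw [List.reverse_append]
            simp only [List.reverse_cons, List.reverse_nil, List.nil_append, List.singleton_append]
            refine List.nodup_cons.2 ⟨?_, hnd⟩
            intro hmem
            have := pvChain_mem_contains hch v hmem
            rw [hfr v hv] at this
            exact absurd this (by simp)

-- ===== VERDICT (by name: the statement is the Claim_ definition above) =====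
theorem certify_f1_py_spec : Claim_equal_certify_f1_py := by
  intro adj src dst _
  unfold Spec_certify_f1_py certify_f1_py certify_f1_py_alt
  dsimp only
  cases hs : (PySem.Dict.mk adj).contains src with
  | false => simp
  | true =>
  cases hd : (PySem.Dict.mk adj).contains dst with
  | false => simp
  | true =>
  simp only [Bool.not_true, Bool.or_self, Bool.and_self, Bool.false_eq_true,
    if_false, if_true]
  apply pvLoop_eq
  refine ⟨?_, ?_, ?_⟩
  · intro x
    rw [set_contains_add, PySem.Dict.contains_insert, PySem.Dict.contains_empty]
    show (List.contains [] x || (x == src)) = _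
    cases (x == src) <;> rfl
  · exact PySem.Dict.nodup_keys_insert _ _ _ PySem.Dict.nodup_keys_empty
  · show List.Forall₂ _ [src] (List.drop 0 [[src]])
    refine List.forall₂_cons.2 ⟨⟨?_, by simp, by simp⟩, List.Forall₂.nil⟩
    show pvChain _ [src].reverse
    simp only [List.reverse_cons, List.reverse_nil, List.nil_append]
    exact ⟨PySem.Dict.contains_insert_self _ _ _, by rw [PySem.Dict.getD_insert_self]⟩
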